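-- pv_equiv track=rewrite | github.com/neskk/PoGo-Proxies | proxytools/scrappers/sockslist.py | crazy_decode
-- ===== SOURCE A (Python) =====
-- def crazy_decode(dictionary, code):
--     if code.isdigit():
--         return code
--     value = dictionary.get(code, False)
--     if value and value.isdigit():
--         return value
--     elif '^' in code:
--         l_value, r_value = code.split('^', 1)
--         answer = str(int(crazy_decode(dictionary, l_value)) ^
--                      int(crazy_decode(dictionary, r_value)))
--         return answer
-- ===== SOURCE B (Python) =====
-- # Iterative re-implementation: the recursive descent is replaced by two explicit
-- # phases -- a scan that collects the '^'-separated heads up to the first suffix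
-- # that resolves on its own, then a reversed loop that XORs the heads back in.
--
-- def _resolve(dictionary, token):
--     """Resolve a token to a digit string (the token itself or its digit-valued
--     dictionary entry), or None if it cannot be resolved."""
--     if token.isdigit():
--         return token
--     value = dictionary.get(token, False)
--     if value and value.isdigit():
--         return value
--     return None
--
-- def crazy_decode(dictionary, code):
--     if code.isdigit():
--         return code
--     value = dictionary.get(code, False)
--     if value and value.isdigit():
--         return value
--     if '^' not in code:
--         return None
--     heads = []
--     rest = code
--     while _resolve(dictionary, rest) is None and '^' in rest:
--         head, rest = rest.split('^', 1)
--         heads.append(head)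
--     acc = _resolve(dictionary, rest)
--     for head in reversed(heads):
--         acc = str(int(_resolve(dictionary, head)) ^ int(acc))
--     return acc
-- ===== Notes on version B (the rewrite author's own statement) =====
-- stated objective: alternative
-- what changed: The recursive descent over the right part of each '^'-split is replaced by a non-recursive two-phase pass: a loop that collects the head tokens until the remaining suffix resolves (or has no '^'), then a reversed loop that XORs the heads into the decoded suffix.
import Mathlib
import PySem

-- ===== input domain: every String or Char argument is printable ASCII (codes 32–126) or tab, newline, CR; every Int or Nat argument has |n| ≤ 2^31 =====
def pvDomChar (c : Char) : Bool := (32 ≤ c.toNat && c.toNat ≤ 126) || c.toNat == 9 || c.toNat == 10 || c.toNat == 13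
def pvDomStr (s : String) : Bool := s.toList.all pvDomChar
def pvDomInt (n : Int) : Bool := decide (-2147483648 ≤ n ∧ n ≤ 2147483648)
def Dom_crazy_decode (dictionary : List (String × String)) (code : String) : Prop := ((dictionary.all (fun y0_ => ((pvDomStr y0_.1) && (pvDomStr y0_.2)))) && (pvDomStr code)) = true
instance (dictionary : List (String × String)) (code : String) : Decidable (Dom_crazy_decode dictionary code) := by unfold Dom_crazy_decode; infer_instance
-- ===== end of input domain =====

-- ===== PORT A =====
-- shared helpers: Python's  value and value.isdigit()  truthiness test, and  s.split('^', 1)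
def pvTruthyDigit (value : Option String) : Bool :=
  match value with
  | some v => v != "" && PySem.Str.strIsdigit v
  | none => false

def pvSplitOnce (cs : List Char) : List Char × List Char :=
  (cs.takeWhile (fun c => c != '^'),
   cs.drop ((cs.takeWhile (fun c => c != '^')).length + 1))

-- termination facts for the '^'-splitting recursions (cited in decreasing_by)
theorem pvCaretMem (cs : List Char) (h : PySem.Chars.isIn ['^'] cs = true) : '^' ∈ cs := by
  have := (PySem.Chars.isIn_iff_infix (sub := ['^']) (s := cs)).mp h
  exact this.mem (List.mem_singleton_self _)

theorem pvTakeWhile_lt : ∀ (cs : List Char), '^' ∈ cs →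
    (cs.takeWhile (fun c => c != '^')).length < cs.length := by
  intro cs hm
  induction cs with
  | nil => simp at hm
  | cons c t ih =>
    by_cases hc : (c != '^') = true
    · have hne : c ≠ '^' := by simpa using hc
      have hmt : '^' ∈ t := by
        rcases List.mem_cons.mp hm with h | h
        · exact absurd h.symm hne
        · exact h
      simp only [List.takeWhile_cons, hc, if_true, List.length_cons]
      exact Nat.succ_lt_succ (ih hmt)
    · have hcf : (c != '^') = false := by simpa using hc
      simp only [List.takeWhile_cons, hcf, Bool.false_eq_true, if_false, List.length_nil,
        List.length_cons]
      omega

theorem pvFst_lt (cs : List Char) (h : PySem.Chars.isIn ['^'] cs = true) :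
    (pvSplitOnce cs).1.length < cs.length :=
  pvTakeWhile_lt cs (pvCaretMem cs h)

theorem pvSnd_lt (cs : List Char) (h : PySem.Chars.isIn ['^'] cs = true) :
    (pvSplitOnce cs).2.length < cs.length := by
  have hm := pvCaretMem cs h
  have hne : cs ≠ [] := by rintro rfl; simp at hm
  have : 0 < cs.length := List.length_pos_iff.mpr hne
  simp only [pvSplitOnce, List.length_drop]
  omega

-- port of A: the recursive decoder (crazy_decode works on code.toList)
def crazy_decode_aux (dictionary : List (String × String)) (cs : List Char) : Option String :=
  if PySem.Chars.strIsdigit cs then some (String.mk cs)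
  else if pvTruthyDigit (PySem.Dict.get? (PySem.Dict.ofList dictionary) (String.mk cs)) then
    PySem.Dict.get? (PySem.Dict.ofList dictionary) (String.mk cs)
  else if h : PySem.Chars.isIn ['^'] cs = true then
    match crazy_decode_aux dictionary (pvSplitOnce cs).1 with
    | none => none
    | some a =>
      match PySem.Int.ofStr? a with
      | none => none
      | some x =>
        match crazy_decode_aux dictionary (pvSplitOnce cs).2 with
        | none => none
        | some b =>
          match PySem.Int.ofStr? b with
          | none => none
          | some y => some (PySem.Int.toStr (PySem.Int.bxor x y))
  else none
termination_by cs.length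
decreasing_by
  · exact pvFst_lt cs h
  · exact pvSnd_lt cs h

def crazy_decode (dictionary : List (String × String)) (code : String) : Option String :=
  crazy_decode_aux dictionary code.toList

-- ===== PORT B =====
-- Source B's _resolve helper
def pvResolve (dictionary : List (String × String)) (cs : List Char) : Option String :=
  if PySem.Chars.strIsdigit cs then some (String.mk cs)
  else if pvTruthyDigit (PySem.Dict.get? (PySem.Dict.ofList dictionary) (String.mk cs)) then
    PySem.Dict.get? (PySem.Dict.ofList dictionary) (String.mk cs)
  else none

-- phase 1: the while loop collecting the heads split off before the first suffix
-- that resolves on its own (or has no '^' left)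
def pvPhase1 (dictionary : List (String × String)) (cs : List Char) :
    List (List Char) × List Char :=
  if h : ((pvResolve dictionary cs).isNone && PySem.Chars.isIn ['^'] cs) = true then
    ((pvSplitOnce cs).1 :: (pvPhase1 dictionary (pvSplitOnce cs).2).1,
     (pvPhase1 dictionary (pvSplitOnce cs).2).2)
  else ([], cs)
termination_by cs.length
decreasing_by
  · exact pvSnd_lt cs (by simp [Bool.and_eq_true] at h; exact h.2)

-- phase 2: one step of the reversed for loop,  acc = str(int(_resolve(head)) ^ int(acc))
def pvStep (dictionary : List (String × String)) (head : List Char) (acc : Option String) :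
    Option String :=
  match pvResolve dictionary head with
  | none => none
  | some a =>
    match PySem.Int.ofStr? a with
    | none => none
    | some x =>
      match acc with
      | none => none
      | some b =>
        match PySem.Int.ofStr? b with
        | none => none
        | some y => some (PySem.Int.toStr (PySem.Int.bxor x y))

def crazy_decode_alt_aux (dictionary : List (String × String)) (cs : List Char) : Option String :=
  if PySem.Chars.strIsdigit cs then some (String.mk cs)
  else if pvTruthyDigit (PySem.Dict.get? (PySem.Dict.ofList dictionary) (String.mk cs)) then
    PySem.Dict.get? (PySem.Dict.ofList dictionary) (String.mk cs)
  else if PySem.Chars.isIn ['^'] cs = true then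
    (pvPhase1 dictionary cs).1.foldr (pvStep dictionary)
      (pvResolve dictionary (pvPhase1 dictionary cs).2)
  else none

def crazy_decode_alt (dictionary : List (String × String)) (code : String) : Option String :=
  crazy_decode_alt_aux dictionary code.toList

-- ===== PRECONDITION & SPEC =====
-- Pre_ excludes exactly the inputs on which A raises TypeError (int(None) on an
-- unresolvable token before any resolvable suffix is reached); it admits every
-- input on which A returns (including the implicit return None).
def pvResolvableS (dictionary : List (String × String)) (t : String) : Bool :=
  PySem.Str.strIsdigit t ||
  (match PySem.Dict.get? (PySem.Dict.ofList dictionary) t with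
   | some v => v != "" && PySem.Str.strIsdigit v
   | none => false)

def Pre_crazy_decode (dictionary : List (String × String)) (code : String) : Prop :=
  PySem.Str.isIn "^" code = false ∨
  ∃ k < ((PySem.Str.split? code "^").getD []).length,
    (((PySem.Str.split? code "^").getD []).take k).all (pvResolvableS dictionary) = true ∧
    pvResolvableS dictionary
      (PySem.Str.join "^" (((PySem.Str.split? code "^").getD []).drop k)) = true

instance (dictionary : List (String × String)) (code : String) :
    Decidable (Pre_crazy_decode dictionary code) := by
  unfold Pre_crazy_decode; infer_instance

def pvWitness_crazy_decode : (List (String × String)) × String :=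
  ([("a", "5"), ("b", "3")], "a^b")

def Spec_crazy_decode (dictionary : List (String × String)) (code : String) (out : Option String) : Prop := out = crazy_decode_alt dictionary code
instance (dictionary : List (String × String)) (code : String) (out : Option String) : Decidable (Spec_crazy_decode dictionary code out) := by unfold Spec_crazy_decode; infer_instance

-- ===== CLAIM (what is proved, stated in full; the proofs are below) =====
def Claim_equal_crazy_decode : Prop := ∀ (dictionary : List (String × String)) (code : String), Dom_crazy_decode dictionary code → Pre_crazy_decode dictionary code → Spec_crazy_decode dictionary code (crazy_decode dictionary code)

-- ===== LEMMAS AND PROOFS =====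

theorem pvResolve_none (dictionary : List (String × String)) (cs : List Char)
    (h : pvResolve dictionary cs = none) :
    PySem.Chars.strIsdigit cs = false ∧
    pvTruthyDigit (PySem.Dict.get? (PySem.Dict.ofList dictionary) (String.mk cs)) = false := by
  unfold pvResolve at h
  split_ifs at h with h1 h2
  · rw [h] at h2
    simp [pvTruthyDigit] at h2
  · exact ⟨by simpa using h1, by simpa using h2⟩

theorem pvAux_of_resolve_some (dictionary : List (String × String)) (cs : List Char)
    (r : String) (h : pvResolve dictionary cs = some r) :
    crazy_decode_aux dictionary cs = some r := by
  unfold pvResolve at h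
  rw [crazy_decode_aux]
  by_cases h1 : PySem.Chars.strIsdigit cs = true
  · rw [if_pos h1] at h ⊢
    exact h
  · rw [if_neg h1] at h ⊢
    by_cases h2 : pvTruthyDigit (PySem.Dict.get? (PySem.Dict.ofList dictionary) (String.mk cs)) = true
    · rw [if_pos h2] at h ⊢
      exact h
    · rw [if_neg h2] at h
      exact absurd h (by simp)

theorem pvAux_no_caret (dictionary : List (String × String)) (cs : List Char)
    (h : PySem.Chars.isIn ['^'] cs = false) :
    crazy_decode_aux dictionary cs = pvResolve dictionary cs := by
  rw [crazy_decode_aux]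
  unfold pvResolve
  by_cases h1 : PySem.Chars.strIsdigit cs = true
  · rw [if_pos h1, if_pos h1]
  · rw [if_neg h1, if_neg h1]
    by_cases h2 : pvTruthyDigit (PySem.Dict.get? (PySem.Dict.ofList dictionary) (String.mk cs)) = true
    · rw [if_pos h2, if_pos h2]
    · rw [if_neg h2, if_neg h2, dif_neg (by simp [h])]

theorem pvHead_no_caret (cs : List Char) :
    PySem.Chars.isIn ['^'] (pvSplitOnce cs).1 = false := by
  rcases hb : PySem.Chars.isIn ['^'] (pvSplitOnce cs).1 with _ | _
  · rfl
  · exfalso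
    have hm := pvCaretMem _ hb
    have := List.mem_takeWhile_imp (p := fun c => c != '^') (l := cs) hm
    simp at this

theorem pvPhase1_foldr (dictionary : List (String × String)) :
    ∀ (n : Nat) (cs : List Char), cs.length ≤ n →
      (pvPhase1 dictionary cs).1.foldr (pvStep dictionary)
        (pvResolve dictionary (pvPhase1 dictionary cs).2) =
      crazy_decode_aux dictionary cs := by
  intro n
  induction n with
  | zero =>
    intro cs hle
    have hnil : cs = [] := List.length_eq_zero_iff.mp (Nat.le_zero.mp hle)
    subst hnil
    have hin : PySem.Chars.isIn ['^'] ([] : List Char) = false := by decide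
    rw [pvPhase1, dif_neg (by simp [hin])]
    exact (pvAux_no_caret dictionary [] hin).symm
  | succ n ih =>
    intro cs hle
    cases hres : pvResolve dictionary cs with
    | some r =>
      rw [pvPhase1, dif_neg (by simp [hres])]
      show pvResolve dictionary cs = _
      rw [hres, pvAux_of_resolve_some dictionary cs r hres]
    | none =>
      by_cases hin : PySem.Chars.isIn ['^'] cs = true
      · have hcond : ((pvResolve dictionary cs).isNone && PySem.Chars.isIn ['^'] cs) = true := by
          simp [hres, hin]
        rw [pvPhase1, dif_pos hcond]
        show pvStep dictionary (pvSplitOnce cs).1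
            ((pvPhase1 dictionary (pvSplitOnce cs).2).1.foldr (pvStep dictionary)
              (pvResolve dictionary (pvPhase1 dictionary (pvSplitOnce cs).2).2)) = _
        obtain ⟨hd1, hd2⟩ := pvResolve_none dictionary cs hres
        conv_rhs => rw [crazy_decode_aux]
        rw [if_neg (show ¬(PySem.Chars.strIsdigit cs = true) by simp [hd1]),
          if_neg (show ¬(pvTruthyDigit (PySem.Dict.get? (PySem.Dict.ofList dictionary)
            (String.mk cs)) = true) by simp [hd2]),
          dif_pos hin,
          pvAux_no_caret dictionary (pvSplitOnce cs).1 (pvHead_no_caret cs),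
          ih _ (by have := pvSnd_lt cs hin; omega)]
        rfl
      · have hf : PySem.Chars.isIn ['^'] cs = false := by simpa using hin
        rw [pvPhase1, dif_neg (by simp [hf])]
        show pvResolve dictionary cs = _
        rw [pvAux_no_caret dictionary cs hf]

theorem pvMain (dictionary : List (String × String)) (cs : List Char) :
    crazy_decode_aux dictionary cs = crazy_decode_alt_aux dictionary cs := by
  unfold crazy_decode_alt_aux
  by_cases h1 : PySem.Chars.strIsdigit cs = true
  · rw [if_pos h1, crazy_decode_aux, if_pos h1]
  · rw [if_neg h1]
    by_cases h2 : pvTruthyDigit (PySem.Dict.get? (PySem.Dict.ofList dictionary) (String.mk cs)) = true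
    · rw [if_pos h2, crazy_decode_aux, if_neg h1, if_pos h2]
    · rw [if_neg h2]
      by_cases h3 : PySem.Chars.isIn ['^'] cs = true
      · rw [if_pos h3]
        exact (pvPhase1_foldr dictionary cs.length cs le_rfl).symm
      · rw [if_neg h3, pvAux_no_caret dictionary cs (by simpa using h3)]
        unfold pvResolve
        rw [if_neg h1, if_neg h2]

-- ===== VERDICT (by name: the statement is the Claim_ definition above) =====
theorem crazy_decode_spec : Claim_equal_crazy_decode := by
  intro dictionary code _ _
  unfold Spec_crazy_decode crazy_decode crazy_decode_alt
  exact pvMain dictionary code.toList
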